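-- pv_equiv track=rewrite | github.com/Paul-Haley/adventofcode_2017 | day24/day24a.py | nextPiece
-- ===== SOURCE A (Python) =====
-- def nextPiece(previous, parts):
--     weights = list()
--     for part in parts:
--         w = part[0] + part[1]
--         for i in range(2):
--             if part[i] == previous:
--                 reduced = parts.copy()
--                 reduced.discard(part)
--                 weights.append(w + nextPiece(part[(i+1)%2], reduced))
--     if len(weights) == 0:
--         weights.append(0)
--     return max(weights)
-- ===== SOURCE B (Python) =====
-- def nextPiece(previous, parts):
--     memo = {}
--
--     def best(prev, remaining):
--         key = (prev, remaining)
--         if key in memo: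
--             return memo[key]
--         result = None
--         for part in remaining:
--             if part[0] == prev or part[1] == prev:
--                 other = part[1] if part[0] == prev else part[0]
--                 cand = part[0] + part[1] + best(other, remaining - frozenset((part,)))
--                 if result is None or cand > result:
--                     result = cand
--         result = 0 if result is None else result
--         memo[key] = result
--         return result
--
--     return best(previous, frozenset(parts))
-- ===== Notes on version B (the rewrite author's own statement) =====
-- stated objective: alternative
-- what changed: B replaces A's brute-force recursive enumeration (which recomputes the best bridge for the same remaining set many times) by a memoized recursion keyed on (previous connector, frozenset of remaining parts), and tracks a running maximum instead of materialising the list of candidate weights.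
import Mathlib
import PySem

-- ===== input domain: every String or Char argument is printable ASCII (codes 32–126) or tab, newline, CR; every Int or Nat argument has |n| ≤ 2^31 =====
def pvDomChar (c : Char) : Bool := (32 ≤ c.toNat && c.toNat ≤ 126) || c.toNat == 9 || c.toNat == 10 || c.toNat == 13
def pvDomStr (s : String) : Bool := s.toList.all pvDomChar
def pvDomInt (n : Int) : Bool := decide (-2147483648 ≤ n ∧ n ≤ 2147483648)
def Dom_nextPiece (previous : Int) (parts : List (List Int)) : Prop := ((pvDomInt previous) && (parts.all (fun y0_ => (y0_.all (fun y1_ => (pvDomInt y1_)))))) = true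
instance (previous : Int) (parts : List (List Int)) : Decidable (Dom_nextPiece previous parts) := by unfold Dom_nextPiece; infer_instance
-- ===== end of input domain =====

-- B replaces A's brute-force recursive search by a memoized recursion keyed on (previous, remaining parts) with a running maximum.
-- Pre_ excludes inputs on which Python A raises IndexError (a part with fewer than 2 connectors).


-- ===== PORT A =====
-- fuel is only a totality guard: the top-level call passes parts.length + 1, which is never exhausted
-- (each recursive call is on parts with one element discarded). parts is a Python set of tuples,
-- represented as a list of its distinct elements; 'reduced.discard(part)' is PySem.Set.discard.
-- A part shorter than 2 makes Python raise IndexError at part[0]/part[1] (pyGet? = none): the port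
-- skips such a part; Pre_ excludes those inputs.
def nextPieceA (fuel : Nat) (previous : Int) (parts : List (List Int)) : Int :=
  match fuel with
  | 0 => 0
  | f + 1 =>
    let weights := parts.foldl (fun ws part =>
      match PySem.List.pyGet? part 0, PySem.List.pyGet? part 1 with
      | some a, some b =>
        let w := a + b
        -- for i in range(2), unrolled: i = 0 then i = 1
        let ws := if a = previous then
            ws ++ [w + nextPieceA f b (PySem.Set.discard parts part)] else ws
        if b = previous then
            ws ++ [w + nextPieceA f a (PySem.Set.discard parts part)] else ws
      | _, _ => ws) []
    let weights := if weights.isEmpty then [0] else weights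
    (PySem.List.max? weights (fun x => x)).getD 0

def nextPiece (previous : Int) (parts : List (List Int)) : Int :=
  nextPieceA (parts.length + 1) previous parts

-- ===== PORT B =====
abbrev PVMemo := PySem.Dict (Int × List (List Int)) Int

-- one iteration of Source B's 'for part in remaining' loop, threading (best-so-far, memo)
def pvStepB (recur : Int → List (List Int) → PVMemo → Int × PVMemo)
    (prev : Int) (remaining : List (List Int))
    (st : Option Int × PVMemo) (part : List Int) : Option Int × PVMemo :=
  match PySem.List.pyGet? part 0, PySem.List.pyGet? part 1 with
  | some a, some b =>
    if a = prev ∨ b = prev then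
      let other := if a = prev then b else a
      let r := recur other (PySem.Set.diff remaining [part]) st.2
      let cand := a + b + r.1
      (match st.1 with
       | none => some cand
       | some m => if m < cand then some cand else some m, r.2)
    else st
  | _, _ => st

-- memoized search; fuel is only a totality guard (top call passes parts.length + 1)
def nextPieceB (fuel : Nat) (prev : Int) (remaining : List (List Int)) (memo : PVMemo) :
    Int × PVMemo :=
  match fuel with
  | 0 => (0, memo)
  | f + 1 =>
    match memo.get? (prev, remaining) with
    | some v => (v, memo)
    | none =>
      let st := remaining.foldl (pvStepB (nextPieceB f) prev remaining) (none, memo)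
      let result := st.1.getD 0
      (result, st.2.insert (prev, remaining) result)

def nextPiece_alt (previous : Int) (parts : List (List Int)) : Int :=
  (nextPieceB (parts.length + 1) previous parts PySem.Dict.empty).1

-- ===== PRECONDITION & SPEC =====
-- Pre_ excludes exactly the inputs on which Python A raises IndexError: some part has fewer than 2 entries.
def Pre_nextPiece (previous : Int) (parts : List (List Int)) : Prop :=
  ∀ part ∈ parts, 2 ≤ part.length
instance (previous : Int) (parts : List (List Int)) : Decidable (Pre_nextPiece previous parts) := by
  unfold Pre_nextPiece; infer_instance

def pvWitness_nextPiece : Int × List (List Int) := (0, [[0, 1], [1, 2]])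

def Spec_nextPiece (previous : Int) (parts : List (List Int)) (out : Int) : Prop :=
  out = nextPiece_alt previous parts
instance (previous : Int) (parts : List (List Int)) (out : Int) :
    Decidable (Spec_nextPiece previous parts out) := by unfold Spec_nextPiece; infer_instance

-- ===== CLAIM (what is proved, stated in full; the proofs are below) =====
def Claim_equal_nextPiece : Prop := ∀ (previous : Int) (parts : List (List Int)),
  Dom_nextPiece previous parts → Pre_nextPiece previous parts →
  Spec_nextPiece previous parts (nextPiece previous parts)

-- ===== LEMMAS AND PROOFS =====

-- the value A computes with sufficient fuel
def pvAV (p : Int) (l : List (List Int)) : Int := nextPieceA (l.length + 1) p l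

-- A's per-part candidate weights (recursive calls written with full fuel)
def pvCand (p : Int) (l : List (List Int)) (part : List Int) : List Int :=
  match PySem.List.pyGet? part 0, PySem.List.pyGet? part 1 with
  | some a, some b =>
    (if a = p then [a + b + pvAV b (PySem.Set.discard l part)] else []) ++
    (if b = p then [a + b + pvAV a (PySem.Set.discard l part)] else [])
  | _, _ => []

-- B's per-part candidate (at most one)
def pvCandB (p : Int) (l : List (List Int)) (part : List Int) : List Int :=
  match PySem.List.pyGet? part 0, PySem.List.pyGet? part 1 with
  | some a, some b =>
    if a = p ∨ b = p then
      [a + b + pvAV (if a = p then b else a) (PySem.Set.discard l part)]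
    else []
  | _, _ => []

-- running maximum, exactly B's update rule
def pvRM (b : Option Int) (ws : List Int) : Option Int :=
  ws.foldl (fun o x => match o with
    | none => some x
    | some m => if m < x then some x else some m) b

def pvMx (ws : List Int) : Int :=
  (PySem.List.max? (if ws.isEmpty then [0] else ws) (fun x => x)).getD 0

def pvGood (memo : PVMemo) : Prop :=
  ∀ p l v, memo.get? (p, l) = some v → v = pvAV p l

theorem pv_discard_len_lt {l : List (List Int)} {part : List Int} (h : part ∈ l) :
    (PySem.Set.discard l part).length < l.length := by
  simp only [PySem.Set.discard]
  refine lt_of_le_of_ne (List.length_filter_le _ _) (fun he => ?_)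
  have := List.length_filter_eq_length_iff.mp he part h
  simp at this

theorem pv_diff_singleton (l : List (List Int)) (part : List Int) :
    PySem.Set.diff l [part] = PySem.Set.discard l part := by
  simp only [PySem.Set.diff, PySem.Set.discard]
  apply List.filter_congr
  intro x _
  simp only [PySem.Set.contains]
  by_cases h : x = part
  · subst h; simp
  · simp [h]

theorem pvA_irrel : ∀ (n : Nat) (l : List (List Int)), l.length ≤ n →
    ∀ f f', l.length < f → l.length < f' → ∀ p, nextPieceA f p l = nextPieceA f' p l := by
  intro n
  induction n with
  | zero =>
    intro l hl f f' hf hf' p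
    have : l = [] := List.length_eq_zero_iff.mp (Nat.le_zero.mp hl)
    subst this
    match f, f', hf, hf' with
    | fa + 1, fb + 1, _, _ => simp [nextPieceA]
  | succ n ih =>
    intro l hl f f' hf hf' p
    match f, f', hf, hf' with
    | fa + 1, fb + 1, hf, hf' =>
      simp only [nextPieceA]
      have hfold : l.foldl (fun ws part =>
          match PySem.List.pyGet? part 0, PySem.List.pyGet? part 1 with
          | some a, some b =>
            let w := a + b
            let ws := if a = p then
                ws ++ [w + nextPieceA fa b (PySem.Set.discard l part)] else ws
            if b = p then
                ws ++ [w + nextPieceA fa a (PySem.Set.discard l part)] else ws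
          | _, _ => ws) [] = l.foldl (fun ws part =>
          match PySem.List.pyGet? part 0, PySem.List.pyGet? part 1 with
          | some a, some b =>
            let w := a + b
            let ws := if a = p then
                ws ++ [w + nextPieceA fb b (PySem.Set.discard l part)] else ws
            if b = p then
                ws ++ [w + nextPieceA fb a (PySem.Set.discard l part)] else ws
          | _, _ => ws) [] := by
        apply PySem.List.foldl_congr_mem
        intro ws part hmem
        have hd := pv_discard_len_lt hmem
        have hrec : ∀ q, nextPieceA fa q (PySem.Set.discard l part) =
            nextPieceA fb q (PySem.Set.discard l part) := by
          intro q
          exact ih (PySem.Set.discard l part) (by omega) fa fb (by omega) (by omega) q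
        cases PySem.List.pyGet? part 0 <;> cases PySem.List.pyGet? part 1 <;>
          simp only [] <;> rw [hrec, hrec]
      rw [hfold]

theorem pvA_eq (f : Nat) (p : Int) (l : List (List Int)) (hf : l.length < f) :
    nextPieceA f p l = pvMx (l.flatMap (pvCand p l)) := by
  match f, hf with
  | fa + 1, hf =>
    simp only [nextPieceA]
    have hfold : l.foldl (fun ws part =>
        match PySem.List.pyGet? part 0, PySem.List.pyGet? part 1 with
        | some a, some b =>
          let w := a + b
          let ws := if a = p then
              ws ++ [w + nextPieceA fa b (PySem.Set.discard l part)] else ws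
          if b = p then
              ws ++ [w + nextPieceA fa a (PySem.Set.discard l part)] else ws
        | _, _ => ws) [] = l.foldl (fun ws part => ws ++ pvCand p l part) [] := by
      apply PySem.List.foldl_congr_mem
      intro ws part hmem
      have hd := pv_discard_len_lt hmem
      have hrec : ∀ q, nextPieceA fa q (PySem.Set.discard l part) =
          pvAV q (PySem.Set.discard l part) := by
        intro q
        exact pvA_irrel (PySem.Set.discard l part).length _ le_rfl fa _ (by omega) (by omega) q
      unfold pvCand
      cases PySem.List.pyGet? part 0 with
      | none => simp
      | some a =>
        cases PySem.List.pyGet? part 1 with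
        | none => simp
        | some b =>
          simp only [hrec]
          by_cases h1 : a = p <;> by_cases h2 : b = p <;> simp [h1, h2]
    rw [hfold, PySem.List.foldl_append_eq_flatMap]
    rfl

theorem pvRM_append (b : Option Int) (ws ws' : List Int) :
    pvRM b (ws ++ ws') = pvRM (pvRM b ws) ws' := List.foldl_append ..

theorem pvRM_cand_eq (p : Int) (l : List (List Int)) (part : List Int) (b : Option Int) :
    pvRM b (pvCand p l part) = pvRM b (pvCandB p l part) := by
  unfold pvCand pvCandB
  cases PySem.List.pyGet? part 0 with
  | none => rfl
  | some a =>
    cases PySem.List.pyGet? part 1 with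
    | none => rfl
    | some c =>
      by_cases h1 : a = p <;> by_cases h2 : c = p
      · -- a = p and c = p, hence a = c: the two equal candidates collapse to one
        subst h1; subst h2
        simp only [or_self, ite_true, List.singleton_append]
        cases b with
        | none => simp [pvRM, List.foldl]
        | some m => by_cases h : m < c + c + pvAV c (PySem.Set.discard l part) <;>
            simp [pvRM, List.foldl, h]
      · simp [h1, h2]
      · simp [h1, h2]
      · simp [h1, h2, pvRM]

theorem pvRM_flatMap_congr (p : Int) (l : List (List Int)) :
    ∀ (rest : List (List Int)) (b : Option Int),
      pvRM b (rest.flatMap (pvCand p l)) = pvRM b (rest.flatMap (pvCandB p l)) := by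
  intro rest
  induction rest with
  | nil => intro b; rfl
  | cons part rest ih =>
    intro b
    rw [List.flatMap_cons, List.flatMap_cons, pvRM_append, pvRM_append,
      pvRM_cand_eq, ih]

theorem pvRM_none_eq_max (ws : List Int) :
    pvRM none ws = PySem.List.max? ws (fun y => y) := by
  simp only [pvRM, PySem.List.max?]
  congr 1
  funext o x
  cases o <;> rfl

theorem pvMx_eq_pvRM (ws : List Int) : pvMx ws = (pvRM none ws).getD 0 := by
  cases ws with
  | nil => rfl
  | cons x t => rw [pvRM_none_eq_max]; simp [pvMx]

theorem pvB_fold (f : Nat) (p : Int) (l : List (List Int))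
    (HIH : ∀ p' l' memo', l'.length < f → pvGood memo' →
      (nextPieceB f p' l' memo').1 = pvAV p' l' ∧ pvGood (nextPieceB f p' l' memo').2)
    (hlen : l.length ≤ f) :
    ∀ (rest : List (List Int)), (∀ x ∈ rest, x ∈ l) →
      ∀ (b : Option Int) (memo : PVMemo), pvGood memo →
      (rest.foldl (pvStepB (nextPieceB f) p l) (b, memo)).1 = pvRM b (rest.flatMap (pvCandB p l)) ∧
      pvGood (rest.foldl (pvStepB (nextPieceB f) p l) (b, memo)).2 := by
  intro rest
  induction rest with
  | nil => exact fun _ b memo hg => ⟨rfl, hg⟩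
  | cons part rest ih =>
    intro hsub b memo hg
    have hmem : part ∈ l := hsub part (by simp)
    have hsub' : ∀ x ∈ rest, x ∈ l := fun x hx => hsub x (by simp [hx])
    simp only [List.foldl_cons, List.flatMap_cons, pvRM_append]
    cases h0 : PySem.List.pyGet? part 0 with
    | none =>
      have hstep : pvStepB (nextPieceB f) p l (b, memo) part = (b, memo) := by
        simp [pvStepB, h0]
      have hcB : pvCandB p l part = [] := by simp [pvCandB, h0]
      rw [hstep, hcB]
      exact ih hsub' b memo hg
    | some a =>
      cases h1 : PySem.List.pyGet? part 1 with
      | none =>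
        have hstep : pvStepB (nextPieceB f) p l (b, memo) part = (b, memo) := by
          simp [pvStepB, h0, h1]
        have hcB : pvCandB p l part = [] := by simp [pvCandB, h0, h1]
        rw [hstep, hcB]
        exact ih hsub' b memo hg
      | some c =>
        by_cases hc : a = p ∨ c = p
        · have hd := pv_discard_len_lt hmem
          have hlt : (PySem.Set.discard l part).length < f := lt_of_lt_of_le hd hlen
          obtain ⟨hr1, hr2⟩ :=
            HIH (if a = p then c else a) (PySem.Set.discard l part) memo hlt hg
          have hcB : pvCandB p l part =
              [a + c + pvAV (if a = p then c else a) (PySem.Set.discard l part)] := by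
            simp [pvCandB, h0, h1, hc]
          have hstep : pvStepB (nextPieceB f) p l (b, memo) part =
              (pvRM b (pvCandB p l part),
               (nextPieceB f (if a = p then c else a) (PySem.Set.discard l part) memo).2) := by
            simp only [pvStepB, h0, h1, if_pos hc, pv_diff_singleton, hcB]
            rw [hr1]
            cases b <;> rfl
          rw [hstep]
          exact ih hsub' (pvRM b (pvCandB p l part))
            (nextPieceB f (if a = p then c else a) (PySem.Set.discard l part) memo).2 hr2
        · have hstep : pvStepB (nextPieceB f) p l (b, memo) part = (b, memo) := by
            simp [pvStepB, h0, h1, hc]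
          have hcB : pvCandB p l part = [] := by simp [pvCandB, h0, h1, hc]
          rw [hstep, hcB]
          exact ih hsub' b memo hg

theorem pvB_main : ∀ (f : Nat) (p : Int) (l : List (List Int)) (memo : PVMemo),
    l.length < f → pvGood memo →
    (nextPieceB f p l memo).1 = pvAV p l ∧ pvGood (nextPieceB f p l memo).2 := by
  intro f
  induction f with
  | zero => intro p l memo hf; omega
  | succ f ih =>
    intro p l memo hf hg
    simp only [nextPieceB]
    cases hmk : memo.get? (p, l) with
    | some v => exact ⟨hg p l v hmk, hg⟩
    | none =>
      obtain ⟨hfold, hgood⟩ := pvB_fold f p l ih (by omega) l (fun x hx => hx) none memo hg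
      have hres : (l.foldl (pvStepB (nextPieceB f) p l) (none, memo)).1.getD 0 = pvAV p l := by
        rw [hfold, ← pvRM_flatMap_congr, ← pvMx_eq_pvRM, ← pvA_eq (l.length + 1) p l (by omega)]
        rfl
      refine ⟨hres, ?_⟩
      intro p' l' v hv
      rw [PySem.Dict.get?_insert] at hv
      by_cases he : (p', l') = (p, l)
      · rw [if_pos he] at hv
        cases hv
        obtain ⟨rfl, rfl⟩ := Prod.mk.injEq .. ▸ he
        exact hres.symm ▸ rfl
      · rw [if_neg he] at hv
        exact hgood p' l' v hv

-- ===== VERDICT (by name: the statement is the Claim_ definition above) =====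
theorem nextPiece_spec : Claim_equal_nextPiece := by
  intro previous parts _ _
  unfold Spec_nextPiece nextPiece nextPiece_alt
  have h := pvB_main (parts.length + 1) previous parts PySem.Dict.empty
    (by omega) (by intro p l v h; simp [PySem.Dict.get?_empty] at h)
  exact h.1.symm
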